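-- pv_equiv track=rewrite | github.com/BonbonKim/problem-solving | programmers/01_크레인 인형뽑기 게임.py | solution
-- ===== SOURCE A (Python) =====
-- def solution(board, moves):
--     new_board = list([0])
--     board_len = list(range(len(board)))
--
--     for y in board_len:  # 0 1 2 3 4
--         tmp = list()
--         for x in board_len[::-1]: # 4 3 2 1 0
--             if board[x][y] != 0:
--                 tmp.append(board[x][y])
--         new_board.append(tmp)
--
--     answer = 0
--     picked_num = list()
--     for i in moves:
--         if new_board[i]:
--             tmp = new_board[i].pop()
--             picked_num.append(tmp)
--         if len(picked_num) >= 2 and picked_num[-2] == picked_num[-1]: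
--             answer += 2
--             picked_num = picked_num[:-2]
--
--     return answer
-- ===== SOURCE B (Python) =====
-- def solution(board, moves):
--     n = len(board)
--     # 1-indexed columns (crane slots are numbered from 1): slot 0 is an empty dummy
--     cols = [[]] + [[row[c] for row in board] for c in range(n)]
--     top = [0] * (n + 1)      # per-slot pointer: rows already examined, top to bottom
--     stack = []
--     answer = 0
--     for m in moves:
--         col = cols[m]
--         r = top[m]
--         while r < len(col) and col[r] == 0:
--             r += 1
--         if r < len(col):
--             top[m] = r + 1
--             v = col[r]
--             if stack and stack[-1] == v:
--                 stack.pop()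
--                 answer += 2
--             else:
--                 stack.append(v)
--     return answer
-- ===== Notes on version B (the rewrite author's own statement) =====
-- stated objective: alternative
-- what changed: B drops A's up-front construction of reversed per-column nonzero stacks (nested extraction loops plus destructive pops and picked-list slicing) and instead stores the plain 1-indexed columns (leading dummy column) with one row pointer per slot, scanning a column downward on demand inside the move loop and checking the matching stack before pushing instead of pushing-then-popping; Pre_ excludes only inputs on which A raises IndexError (a row shorter than the board height, or a move outside the index range of A's length-(n+1) column list).
import Mathlib
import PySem

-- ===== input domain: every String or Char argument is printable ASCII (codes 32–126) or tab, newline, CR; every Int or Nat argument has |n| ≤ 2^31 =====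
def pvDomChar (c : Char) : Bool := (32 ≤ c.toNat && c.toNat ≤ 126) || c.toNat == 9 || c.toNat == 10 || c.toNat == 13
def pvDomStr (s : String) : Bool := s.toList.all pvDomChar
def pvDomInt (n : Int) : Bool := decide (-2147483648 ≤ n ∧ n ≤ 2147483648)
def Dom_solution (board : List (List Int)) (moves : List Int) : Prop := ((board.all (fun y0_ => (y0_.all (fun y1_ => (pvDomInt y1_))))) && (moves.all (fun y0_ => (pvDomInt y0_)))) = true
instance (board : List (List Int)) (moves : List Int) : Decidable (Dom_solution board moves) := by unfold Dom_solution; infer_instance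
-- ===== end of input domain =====

set_option maxRecDepth 4000


-- B re-implements the game with 1-indexed plain columns (a leading dummy column) and a
-- per-slot row pointer scanned on demand, instead of A's prebuilt reversed nonzero stacks
-- popped destructively; the matching stack is checked before pushing instead of
-- pushed-then-popped with slicing.

-- board[x][y], totalized with defaults (in range under Pre_solution)
def pvCell (board : List (List Int)) (x y : Int) : Int :=
  PySem.List.pyGetD (PySem.List.pyGetD board x []) y 0

-- ===== PORT A =====
-- loop body of 'for i in moves'; state = (new_board, answer, picked_num)
def pvStepA (st : List (List Int) × Int × List Int) (i : Int) : List (List Int) × Int × List Int :=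
  let (nb, answer, picked) := st
  let (nb, picked) :=
    if PySem.List.pyGetD nb i [] ≠ [] then
      match PySem.List.pop? (PySem.List.pyGetD nb i []) with   -- tmp = new_board[i].pop()
      | some (tmp, rest) => (PySem.List.pySetD nb i rest, picked ++ [tmp])
      | none => (nb, picked)   -- unreachable: the list is nonempty
    else (nb, picked)
  if picked.length ≥ 2 ∧ PySem.List.pyGetD picked (-2) 0 = PySem.List.pyGetD picked (-1) 0 then
    (nb, answer + 2, PySem.List.slice picked none (some (-2)))   -- picked_num[:-2]
  else (nb, answer, picked)

def solution (board : List (List Int)) (moves : List Int) : Int :=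
  let board_len := PySem.List.pyRange 0 board.length 1
  -- new_board = list([0]): its single element is the int 0 (falsy, hence never popped);
  -- modeled by the equally falsy [].
  let new_board : List (List Int) :=
    board_len.foldl (fun nb y =>
      nb ++ [((PySem.List.slice? board_len none none (-1)).getD []).foldl   -- board_len[::-1]
               (fun tmp x => if pvCell board x y ≠ 0 then tmp ++ [pvCell board x y] else tmp) []])
      [[]]
  (moves.foldl pvStepA (new_board, 0, [])).2.1

-- ===== PORT B =====
-- the 'while r < len(col) and col[r] == 0: r += 1' loop of Source B
def pvScanL (col : List Int) (r : Int) : Int :=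
  if r < (col.length : Int) then
    (if PySem.List.pyGetD col r 0 = 0 then pvScanL col (r + 1) else r)
  else r
  termination_by ((col.length : Int) - r).toNat
  decreasing_by omega

-- loop body of 'for m in moves'; state = (top, stack, answer)
def pvStepB (cols : List (List Int)) (st : List Int × List Int × Int) (i : Int) :
    List Int × List Int × Int :=
  let (top, stack, answer) := st
  let col := PySem.List.pyGetD cols i []
  let r := pvScanL col (PySem.List.pyGetD top i 0)
  if r < (col.length : Int) then
    let top := PySem.List.pySetD top i (r + 1)
    let v := PySem.List.pyGetD col r 0
    match stack with
    | w :: rest => if w = v then (top, rest, answer + 2) else (top, v :: w :: rest, answer)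
    | [] => (top, [v], answer)
  else (top, stack, answer)

def solution_alt (board : List (List Int)) (moves : List Int) : Int :=
  let n := board.length
  let cols : List (List Int) :=   -- [[]] + [[row[c] for row in board] for c in range(n)]
    [[]] ++ (PySem.List.pyRange 0 (n : Int) 1).map
      (fun c => board.map (fun row => PySem.List.pyGetD row c 0))
  (moves.foldl (pvStepB cols) (List.replicate (n + 1) 0, [], 0)).2.2

-- ===== PRECONDITION & SPEC =====
-- Exactly A's return domain: every row at least as wide as the board is tall (otherwise A
-- raises IndexError while building its columns) and every move a valid Python index into
-- A's length-(n+1) new_board, i.e. -(n+1) ≤ move ≤ n (otherwise A raises IndexError).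
def Pre_solution (board : List (List Int)) (moves : List Int) : Prop :=
  (∀ row ∈ board, board.length ≤ row.length) ∧
  (∀ m ∈ moves, -((board.length : Int) + 1) ≤ m ∧ m ≤ (board.length : Int))
instance (board : List (List Int)) (moves : List Int) : Decidable (Pre_solution board moves) := by
  unfold Pre_solution; infer_instance

def pvWitness_solution : List (List Int) × List Int := ([[0, 3], [2, 5]], [1, 2, 2, 1])

def Spec_solution (board : List (List Int)) (moves : List Int) (out : Int) : Prop :=
  out = solution_alt board moves
instance (board : List (List Int)) (moves : List Int) (out : Int) :
    Decidable (Spec_solution board moves out) := by unfold Spec_solution; infer_instance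

-- ===== CLAIM (what is proved, stated in full; the proofs are below) =====
def Claim_equal_solution : Prop := ∀ (board : List (List Int)) (moves : List Int),
  Dom_solution board moves → Pre_solution board moves →
  Spec_solution board moves (solution board moves)

-- ===== LEMMAS AND PROOFS =====

-- the nonzero entries of column c of the board, rows r..n-1, top-to-bottom
def pvColVals (board : List (List Int)) (c n r : Int) : List Int :=
  if r < n then
    (if pvCell board r c = 0 then pvColVals board c n (r + 1)
     else pvCell board r c :: pvColVals board c n (r + 1))
  else []
  termination_by (n - r).toNat
  decreasing_by all_goals omega

-- the nonzero entries of a column list from index r on, top-to-bottom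
def pvColValsL (col : List Int) (r : Int) : List Int :=
  if r < (col.length : Int) then
    (if PySem.List.pyGetD col r 0 = 0 then pvColValsL col (r + 1)
     else PySem.List.pyGetD col r 0 :: pvColValsL col (r + 1))
  else []
  termination_by ((col.length : Int) - r).toNat
  decreasing_by all_goals omega

lemma pvScanL_ge (col : List Int) (r : Int) : r ≤ pvScanL col r := by
  fun_induction pvScanL col r with
  | case1 r hlt hz ih => omega
  | case2 r hlt hz => omega
  | case3 r hlt => omega

lemma pvColValsL_eq_scan (col : List Int) (r : Int) :
    pvColValsL col r =
      if pvScanL col r < (col.length : Int) then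
        PySem.List.pyGetD col (pvScanL col r) 0 :: pvColValsL col (pvScanL col r + 1)
      else [] := by
  fun_induction pvScanL col r with
  | case1 r hlt hz ih => rw [pvColValsL, if_pos hlt, if_pos hz]; exact ih
  | case2 r hlt hz => rw [pvColValsL, if_pos hlt, if_neg hz]; simp [hlt]
  | case3 r hlt => rw [pvColValsL, if_neg hlt]; simp [hlt]

-- A's inner loop over the reversed range builds the reversed column list
lemma foldl_append_if_filterMap (board : List (List Int)) (y : Int) :
    ∀ (l : List Int) (acc : List Int),
      l.foldl (fun tmp x => if pvCell board x y ≠ 0 then tmp ++ [pvCell board x y] else tmp) acc =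
        acc ++ l.filterMap (fun x => if pvCell board x y ≠ 0 then some (pvCell board x y) else none) := by
  intro l
  induction l with
  | nil => simp
  | cons x xs ih =>
    intro acc
    rw [List.foldl_cons, ih]
    by_cases h : pvCell board x y = 0 <;> simp [h]

lemma filterMap_range_eq_colVals (board : List (List Int)) (y n : Int) :
    ∀ r : Int,
      (PySem.List.pyRange r n 1).filterMap
          (fun x => if pvCell board x y ≠ 0 then some (pvCell board x y) else none) =
        pvColVals board y n r := by
  intro r
  by_cases h : r < n
  · rw [PySem.List.pyRange_one_cons h, pvColVals, if_pos h, List.filterMap_cons,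
      filterMap_range_eq_colVals board y n (r + 1)]
    by_cases hz : pvCell board r y = 0 <;> simp [hz]
  · rw [PySem.List.pyRange_one_eq_nil (by omega), pvColVals, if_neg h]
    simp
  termination_by r => (n - r).toNat
  decreasing_by omega

lemma tmp_eq (board : List (List Int)) (y : Int) (n : Int) :
    (PySem.List.pyRange 0 n 1).reverse.foldl
        (fun tmp x => if pvCell board x y ≠ 0 then tmp ++ [pvCell board x y] else tmp) [] =
      (pvColVals board y n 0).reverse := by
  rw [foldl_append_if_filterMap, List.filterMap_reverse, filterMap_range_eq_colVals]
  simp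

-- reading B's column list agrees with reading the board cell
lemma colList_getD (board : List (List Int)) (c r : Int) (hr : 0 ≤ r) :
    PySem.List.pyGetD (board.map (fun row => PySem.List.pyGetD row c 0)) r 0 =
      pvCell board r c := by
  obtain ⟨k, rfl⟩ : ∃ k : Nat, r = (k : Int) := ⟨r.toNat, by omega⟩
  rw [PySem.List.pyGetD_natCast]
  unfold pvCell
  rw [PySem.List.pyGetD_natCast]
  by_cases hk : k < board.length
  · simp [List.getD_eq_getElem?_getD, List.getElem?_map, List.getElem?_eq_getElem hk]
  · rw [List.getD_eq_getElem?_getD, List.getD_eq_getElem?_getD,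
      List.getElem?_eq_none (by simpa using hk), List.getElem?_eq_none (by omega)]
    simp [PySem.List.pyGetD, PySem.List.pyGet?, PySem.List.pyIdx?]

-- B's column list carries the same nonzero values as A's column scan
lemma colVals_bridge (board : List (List Int)) (c : Int) :
    ∀ r : Int, 0 ≤ r →
      pvColValsL (board.map (fun row => PySem.List.pyGetD row c 0)) r =
        pvColVals board c (board.length : Int) r := by
  intro r hr
  rw [pvColValsL, pvColVals]
  simp only [List.length_map]
  by_cases h : r < (board.length : Int)
  · rw [if_pos h, if_pos h, colList_getD board c r hr,
      colVals_bridge board c (r + 1) (by omega)]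
  · rw [if_neg h, if_neg h]
  termination_by r => ((board.length : Int) - r).toNat
  decreasing_by omega

-- xs[-2] of l ++ [a, b] is a
lemma pyGetD_append_pair_neg_two {l : List Int} {a b d : Int} :
    PySem.List.pyGetD (l ++ [a, b]) (-2) d = a := by
  have h : l ++ [a, b] = (l ++ [a]) ++ [b] := by simp
  rw [h, PySem.List.pyGetD_neg_ofNat _ 2 d (by omega) (by simp)]
  simp

lemma slice_append_pair_neg_two {l : List Int} {a b : Int} :
    PySem.List.slice (l ++ [a, b]) none (some (-2)) = l := by
  rw [PySem.List.slice_to_neg_ofNat _ 2 (by omega)]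
  simp

-- Python list read at a negative in-range index
lemma pvGetD_neg {α : Type} (xs : List α) (m : Int) (d : α)
    (h : -(xs.length : Int) ≤ m) (hm : m < 0) :
    PySem.List.pyGetD xs m d = xs.getD (xs.length - (-m).toNat) d := by
  simp only [PySem.List.pyGetD, PySem.List.pyGet?, PySem.List.pyIdx?]
  rw [if_neg (by omega), if_pos (by omega)]
  simp [List.getD_eq_getElem?_getD]

-- Python list assignment at a negative in-range index
lemma pvSetD_neg {α : Type} (xs : List α) (m : Int) (v : α)
    (h : -(xs.length : Int) ≤ m) (hm : m < 0) :
    PySem.List.pySetD xs m v = xs.set (xs.length - (-m).toNat) v := by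
  simp only [PySem.List.pySetD, PySem.List.pySet?, PySem.List.pyIdx?]
  rw [if_neg (by omega), if_pos (by omega)]
  simp

-- Python indexing at m of a length-L list is plain indexing at the wrapped slot sN
lemma pyGetD_slot {α : Type} (xs : List α) (m : Int) (d : α) (sN L : Nat)
    (hL : xs.length = L) (hlt : sN < L)
    (he : (0 ≤ m ∧ (sN : Int) = m) ∨ (m < 0 ∧ (sN : Int) = (L : Int) + m)) :
    PySem.List.pyGetD xs m d = xs.getD sN d := by
  subst hL
  rcases he with ⟨h0, he⟩ | ⟨h0, he⟩
  · rw [← he, PySem.List.pyGetD_natCast]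
  · rw [pvGetD_neg xs m d (by omega) h0]
    congr 1
    omega

lemma pySetD_slot {α : Type} (xs : List α) (m : Int) (v : α) (sN L : Nat)
    (hL : xs.length = L) (hlt : sN < L)
    (he : (0 ≤ m ∧ (sN : Int) = m) ∨ (m < 0 ∧ (sN : Int) = (L : Int) + m)) :
    PySem.List.pySetD xs m v = xs.set sN v := by
  subst hL
  rcases he with ⟨h0, he⟩ | ⟨h0, he⟩
  · rw [← he, PySem.List.pySetD_natCast]
  · rw [pvSetD_neg xs m v (by omega) h0]
    congr 1
    omega

lemma getD_set_eq {α : Type} (xs : List α) (i : Nat) (v d : α) (h : i < xs.length) :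
    (xs.set i v).getD i d = v := by
  simp [List.getD_eq_getElem?_getD, h]

lemma getD_set_ne {α : Type} (xs : List α) (i j : Nat) (v d : α) (h : i ≠ j) :
    (xs.set i v).getD j d = xs.getD j d := by
  simp [List.getD_eq_getElem?_getD, h]

-- main loop simulation: A's state nb and B's state (top, stack, answer) stay linked slot by slot
lemma main_loop (board : List (List Int)) (cols : List (List Int)) (moves : List Int) :
    ∀ (nb : List (List Int)) (top stack : List Int) (answer : Int),
      (∀ m ∈ moves, -((board.length : Int) + 1) ≤ m ∧ m ≤ (board.length : Int)) →
      cols.length = board.length + 1 →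
      nb.length = board.length + 1 →
      top.length = board.length + 1 →
      stack.IsChain (fun a b => a ≠ b) →
      (∀ s : Nat, s < board.length + 1 → ∃ t : Int, 0 ≤ t ∧
          top.getD s 0 = t ∧
          nb.getD s [] = (pvColValsL (cols.getD s []) t).reverse) →
      (moves.foldl pvStepA (nb, answer, stack.reverse)).2.1 =
        (moves.foldl (pvStepB cols) (top, stack, answer)).2.2 := by
  induction moves with
  | nil => intro nb top stack answer _ _ _ _ _ _; simp
  | cons m ms ih =>
    intro nb top stack answer hmv hcols hlen htop hch hcol
    have hm := (hmv m (List.mem_cons_self))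
    have hms : ∀ m' ∈ ms, -((board.length : Int) + 1) ≤ m' ∧ m' ≤ (board.length : Int) :=
      fun m' h => hmv m' (List.mem_cons_of_mem _ h)
    have hcond : ∀ st : List Int, st.IsChain (fun a b => a ≠ b) →
        ¬(st.reverse.length ≥ 2 ∧
          PySem.List.pyGetD st.reverse (-2) 0 = PySem.List.pyGetD st.reverse (-1) 0) := by
      intro st hch'
      match st, hch' with
      | [], _ => simp
      | [w], _ => simp
      | a :: b :: s, hch' =>
        intro ⟨_, heq⟩
        have hrev : (a :: b :: s).reverse = s.reverse ++ [b, a] := by simp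
        rw [hrev, pyGetD_append_pair_neg_two] at heq
        have hlast : PySem.List.pyGetD (s.reverse ++ [b, a]) (-1) 0 = a := by
          have h2 : s.reverse ++ [b, a] = (s.reverse ++ [b]) ++ [a] := by simp
          rw [h2, PySem.List.pyGetD_neg_one_append_singleton]
        rw [hlast] at heq
        exact (List.isChain_cons_cons.mp hch').1 heq.symm
    simp only [List.foldl_cons]
    -- the wrapped slot sN that the move m addresses in every length-(n+1) list
    obtain ⟨sN, hsN⟩ : ∃ sN : Nat,
        (0 ≤ m ∧ (sN : Int) = m) ∨
        (m < 0 ∧ (sN : Int) = ((board.length + 1 : Nat) : Int) + m) := by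
      by_cases h0 : 0 ≤ m
      · exact ⟨m.toNat, Or.inl ⟨h0, by omega⟩⟩
      · exact ⟨((board.length : Int) + 1 + m).toNat, Or.inr ⟨by omega, by push_cast; omega⟩⟩
    have hsNlt : sN < board.length + 1 := by
      rcases hsN with ⟨h0, he⟩ | ⟨h0, he⟩ <;> push_cast at he <;> omega
    obtain ⟨t, ht0, htopc, hnbc⟩ := hcol sN hsNlt
    set col := cols.getD sN [] with hcoldef
    have hgcols : PySem.List.pyGetD cols m [] = col :=
      pyGetD_slot cols m [] sN (board.length + 1) hcols hsNlt hsN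
    have hgtop : PySem.List.pyGetD top m 0 = t := by
      rw [pyGetD_slot top m 0 sN (board.length + 1) htop hsNlt hsN]; exact htopc
    have hgnb : PySem.List.pyGetD nb m [] = (pvColValsL col t).reverse := by
      rw [pyGetD_slot nb m [] sN (board.length + 1) hlen hsNlt hsN]; exact hnbc
    have hsnb : ∀ X : List Int, PySem.List.pySetD nb m X = nb.set sN X :=
      fun X => pySetD_slot nb m X sN (board.length + 1) hlen hsNlt hsN
    by_cases hr : pvScanL col t < (col.length : Int)
    · -- the slot's column still holds a doll at index r' = pvScanL …
      have hr0 : 0 ≤ pvScanL col t := le_trans ht0 (pvScanL_ge col t)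
      have hv := pvColValsL_eq_scan col t
      rw [if_pos hr] at hv
      set r' := pvScanL col t with hr'def
      set v := PySem.List.pyGetD col r' 0 with hvdef
      set rest := pvColValsL col (r' + 1) with hrestdef
      have e2' : PySem.List.pyGetD nb m [] = rest.reverse ++ [v] := by
        rw [hgnb, hv]; simp
      have hpop : PySem.List.pop? (rest.reverse ++ [v]) = some (v, rest.reverse) :=
        PySem.List.pop?_last _ _
      have hStepA : ∀ picked : List Int, pvStepA (nb, answer, picked) m =
          (if picked.length + 1 ≥ 2 ∧
              PySem.List.pyGetD (picked ++ [v]) (-2) 0 = PySem.List.pyGetD (picked ++ [v]) (-1) 0 then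
            (PySem.List.pySetD nb m rest.reverse, answer + 2,
              PySem.List.slice (picked ++ [v]) none (some (-2)))
          else (PySem.List.pySetD nb m rest.reverse, answer, picked ++ [v])) := by
        intro picked
        simp only [pvStepA, e2', hpop]
        simp
      -- invariant pieces for the updated state
      have hlen' : (PySem.List.pySetD nb m rest.reverse).length = board.length + 1 := by
        rw [hsnb]; simpa using hlen
      have htop' : (PySem.List.pySetD top m (r' + 1)).length = board.length + 1 := by
        rw [pySetD_slot top m (r' + 1) sN (board.length + 1) htop hsNlt hsN]
        simpa using htop
      have hcol' : ∀ s : Nat, s < board.length + 1 → ∃ t' : Int, 0 ≤ t' ∧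
          (PySem.List.pySetD top m (r' + 1)).getD s 0 = t' ∧
          (PySem.List.pySetD nb m rest.reverse).getD s [] =
            (pvColValsL (cols.getD s []) t').reverse := by
        intro s hs
        rw [pySetD_slot top m (r' + 1) sN (board.length + 1) htop hsNlt hsN, hsnb]
        by_cases hss : sN = s
        · subst hss
          exact ⟨r' + 1, by omega,
            getD_set_eq top sN _ 0 (by omega),
            by rw [getD_set_eq nb sN _ [] (by omega), ← hcoldef, hrestdef]⟩
        · obtain ⟨t', h0', htc', hnc'⟩ := hcol s hs
          exact ⟨t', h0', by rw [getD_set_ne top sN s _ 0 hss]; exact htc',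
            by rw [getD_set_ne nb sN s _ [] hss]; exact hnc'⟩
      cases stack with
      | nil =>
        simp only [List.reverse_nil]
        rw [hStepA []]
        have hB : pvStepB cols (top, [], answer) m =
            (PySem.List.pySetD top m (r' + 1), [v], answer) := by
          simp only [pvStepB, hgcols, hgtop, ← hr'def]
          simp [hr, hvdef]
        rw [hB]
        simp only [List.length_nil, List.nil_append]
        rw [if_neg (by simp)]
        have := ih (PySem.List.pySetD nb m rest.reverse)
          (PySem.List.pySetD top m (r' + 1)) [v] answer hms hcols hlen' htop'
          (by simp) hcol'
        simpa using this
      | cons w s =>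
        have hrev : (w :: s).reverse ++ [v] = s.reverse ++ [w, v] := by simp
        have hg2 : PySem.List.pyGetD ((w :: s).reverse ++ [v]) (-2) 0 = w := by
          rw [hrev]; exact pyGetD_append_pair_neg_two
        have hg1 : PySem.List.pyGetD ((w :: s).reverse ++ [v]) (-1) 0 = v := by
          rw [PySem.List.pyGetD_neg_one_append_singleton]
        rw [hStepA ((w :: s).reverse)]
        by_cases hwv : w = v
        · -- matching pair: both sides score 2
          rw [if_pos (⟨by simp, by rw [hg2, hg1]; exact hwv⟩ : _ ∧ _)]
          have hB : pvStepB cols (top, w :: s, answer) m =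
              (PySem.List.pySetD top m (r' + 1), s, answer + 2) := by
            simp only [pvStepB, hgcols, hgtop, ← hr'def]
            simp [hr, ← hvdef, hwv]
          rw [hB]
          have hsl : PySem.List.slice ((w :: s).reverse ++ [v]) none (some (-2)) = s.reverse := by
            rw [hrev]; exact slice_append_pair_neg_two
          rw [hsl]
          exact ih _ _ s (answer + 2) hms hcols hlen' htop' (hch.tail) hcol'
        · -- no match: push
          rw [if_neg (by rw [hg2, hg1]; intro h; exact hwv h.2)]
          have hB : pvStepB cols (top, w :: s, answer) m =
              (PySem.List.pySetD top m (r' + 1), v :: w :: s, answer) := by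
            simp only [pvStepB, hgcols, hgtop, ← hr'def]
            simp [hr, ← hvdef, hwv]
          rw [hB]
          have hrev2 : (w :: s).reverse ++ [v] = (v :: w :: s).reverse := by simp
          rw [hrev2]
          exact ih _ _ (v :: w :: s) answer hms hcols hlen' htop'
            (List.isChain_cons_cons.mpr ⟨fun h => hwv h.symm, hch⟩) hcol'
    · -- exhausted slot: both sides do nothing
      have hcv : pvColValsL col t = [] := by
        rw [pvColValsL_eq_scan, if_neg hr]
      have hB : pvStepB cols (top, stack, answer) m = (top, stack, answer) := by
        simp only [pvStepB, hgcols, hgtop]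
        simp [hr]
      have hA : pvStepA (nb, answer, stack.reverse) m = (nb, answer, stack.reverse) := by
        have e2'' : PySem.List.pyGetD nb m [] = [] := by rw [hgnb, hcv]; rfl
        have hcond2 : 2 ≤ stack.length →
            ¬PySem.List.pyGetD stack.reverse (-2) 0 = PySem.List.pyGetD stack.reverse (-1) 0 :=
          fun h2 heq => hcond stack hch ⟨by simpa using h2, heq⟩
        simp only [pvStepA, e2'']
        simp
        exact hcond2
      rw [hA, hB]
      exact ih nb top stack answer hms hcols hlen htop hch hcol

lemma new_board_eq (board : List (List Int)) :
    (PySem.List.pyRange 0 (board.length : Int) 1).foldl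
        (fun nb y =>
          nb ++ [((PySem.List.slice? (PySem.List.pyRange 0 (board.length : Int) 1) none none (-1)).getD []).foldl
                   (fun tmp x => if pvCell board x y ≠ 0 then tmp ++ [pvCell board x y] else tmp) []])
        [[]] =
      [] :: (PySem.List.pyRange 0 (board.length : Int) 1).map
        (fun y => (pvColVals board y (board.length : Int) 0).reverse) := by
  simp only [PySem.List.slice?_none_none_neg_one, Option.getD_some]
  rw [PySem.List.foldl_append_singleton_eq_map
    (fun y => (PySem.List.pyRange 0 (board.length : Int) 1).reverse.foldl
      (fun tmp x => if pvCell board x y ≠ 0 then tmp ++ [pvCell board x y] else tmp) [])]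
  simp only [tmp_eq]
  simp

-- ===== VERDICT (by name: the statement is the Claim_ definition above) =====
theorem solution_spec : Claim_equal_solution := by
  intro board moves _ hpre
  unfold Spec_solution solution solution_alt
  dsimp only
  rw [new_board_eq board]
  have hmain := main_loop board
      ([] :: (PySem.List.pyRange 0 (board.length : Int) 1).map
        (fun c => board.map (fun row => PySem.List.pyGetD row c 0)))
      moves
      ([] :: (PySem.List.pyRange 0 (board.length : Int) 1).map
        (fun y => (pvColVals board y (board.length : Int) 0).reverse))
      (List.replicate (board.length + 1) 0) [] 0 hpre.2
      (by simp [PySem.List.length_pyRange_one])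
      (by simp [PySem.List.length_pyRange_one])
      (by simp)
      (by simp)
      (by
        intro s hs
        refine ⟨0, le_refl 0, by simp [List.getD_eq_getElem?_getD, hs], ?_⟩
        match s with
        | 0 => simp [pvColValsL]
        | Nat.succ c =>
          have hc : c < board.length := by omega
          simp only [List.getD_cons_succ]
          rw [List.getD_eq_getElem?_getD, List.getD_eq_getElem?_getD,
            PySem.List.getElem?_map_pyRange_zero _ board.length c hc,
            PySem.List.getElem?_map_pyRange_zero _ board.length c hc]
          simp only [Option.getD_some]
          rw [colVals_bridge board (c : Int) 0 le_rfl])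
  simpa using hmain
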